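-- pv_equiv track=rewrite | github.com/khanhvinhbui0512/INTRO_AI | coganh/code_cu/random_minimax.py | vay
-- ===== SOURCE A (Python) =====
-- available_move = [[[(1, 0), (0, 1), (1, 1)],
--                    [(1, 1), (0, 2), (0, 0)],
--                    [(1, 2), (0, 3), (0, 1), (1, 1), (1, 3)],
--                    [(1, 3), (0, 4), (0, 2)],
--                    [(1, 4), (0, 3), (1, 3)]],
--                   [[(2, 0), (1, 1), (0, 0)],
--                    [(2, 1), (1, 2), (1, 0), (0, 1), (0, 0), (0, 2), (2, 0), (2, 2)],
--                    [(2, 2), (1, 3), (1, 1), (0, 2)],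
--                    [(2, 3), (1, 4), (1, 2), (0, 3), (0, 2), (0, 4), (2, 2), (2, 4)],
--                    [(2, 4), (1, 3), (0, 4)]],
--                    [[(3, 0), (2, 1), (1, 0), (1, 1), (3, 1)],
--                    [(3, 1), (2, 2), (2, 0), (1, 1)],
--                    [(3, 2), (2, 3), (2, 1), (1, 2), (1, 1), (1, 3), (3, 1), (3, 3)],
--                    [(3, 3), (2, 4), (2, 2), (1, 3)],
--                    [(3, 4), (2, 3), (1, 4), (1, 3), (3, 3)]],
--                    [[(4, 0), (3, 1), (2, 0)],
--                    [(4, 1), (3, 2), (3, 0), (2, 1), (2, 0), (2, 2), (4, 0), (4, 2)],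
--                    [(4, 2), (3, 3), (3, 1), (2, 2)],
--                    [(4, 3), (3, 4), (3, 2), (2, 3), (2, 2), (2, 4), (4, 2), (4, 4)],
--                    [(4, 4), (3, 3), (2, 4)]],
--                    [[(4, 1), (3, 0), (3, 1)],
--                    [(4, 2), (4, 0), (3, 1)],
--                    [(4, 3), (4, 1), (3, 2), (3, 1), (3, 3)],
--                    [(4, 4), (4, 2), (3, 3)],
--                    [(4, 3), (3, 4), (3, 3)]]]
--
-- def check_component(board,Visited,pos,eval):
--     value = board[pos[0]][pos[1]]
--     # Nơi để lưu trữ các ô cùng màu được liên kết với ô có vị trí pos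
--     component = []
--     # Hàng đợi để dùng BFS duyệt qua các ô
--     queue = []
--     queue.append((pos[0],pos[1]))
--     component.append((pos[0],pos[1]))
--     Visited[pos[0]][pos[1]] = 1
--     #ans = True nếu trong bảng chơi các ô liên kết với ô có vị trí pos sẽ không bị vây
--     #ans = False nếu trong bảng chơi các ô liên kết với ô có vị trí pos bị vây
--     ans = False
--     while(len(queue) > 0):
--         # Lấy các giá trị thuộc đầu hàng đợi
--         temp = queue[0]
--         queue.pop(0)
--         for index in available_move[temp[0]][temp[1]]:
--             #Không duyệt các giá trị đã đi qua
--             if Visited[index[0]][index[1]] != 0: continue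
--             #Nếu có ô liên kết với ô trống nghĩa là sẽ không bị vây
--             if(board[index[0]][index[1]]==0):
--                 ans = True
--             #Nếu có ô tiếp theo cùng màu với ô pos thì sẽ duyệt ô đó tiếp
--             elif (board[index[0]][index[1]] == value):
--                 Visited[index[0]][index[1]] = 1
--                 queue.append(index)
--                 component.append(index)
--     # Đổi các quân bị vây thành các quân vây nó
--     if(ans == False):
--         for index in component:
--             board[index[0]][index[1]] = -value
--         eval -= len(component) * 2 * value
--         return eval
--     return eval
--
-- def vay(board,pos, eval : int):
--     #Mảng hai chiều lưu các vị trí đã đi qua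
--     Visited = [[0,0,0,0,0],[0,0,0,0,0],[0,0,0,0,0],[0,0,0,0,0],[0,0,0,0,0]]
--     #Lưu vị trí quân cờ di chuyển tới sau khi move
--     pos_x = pos[0]
--     pos_y = pos[1]
--     for index in available_move[pos_x][pos_y]:
--         #Nếu muốn vây được thì nhưng ô kề nó sẽ phải khác màu với nó và chưa được đi qua
--         if(board[index[0]][index[1]] == -board[pos_x][pos_y] and Visited[index[0]][index[1]] == 0):
--             #Kiểm tra ô kế bên có nằm trong trường hợp hay không. Nếu có thì sẽ thay đổi trong hàm.
--             eval = check_component(board,Visited,(index[0],index[1]),eval)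
--     return eval
-- ===== SOURCE B (Python) =====
-- # B: recursive DFS flood-fill with formula-computed adjacency, in two phases
-- # (collect all components on the unmutated board, then flip captured ones and score),
-- # replacing A's BFS queue + visited grid + per-seed immediate mutation.
-- # Like A, B mutates `board` in place (captured stones are flipped; final board equals A's);
-- # the proved claim is about the return value.
--
-- def _nbrs(r, c):
--     deltas = [(1, 0), (0, 1), (0, -1), (-1, 0)]
--     if (r + c) % 2 == 0:
--         deltas += [(-1, -1), (-1, 1), (1, -1), (1, 1)]
--     return [(r + dr, c + dc) for dr, dc in deltas
--             if 0 <= r + dr < 5 and 0 <= c + dc < 5]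
--
-- def _flood(board, target, cell, comp):
--     comp.append(cell)
--     for m in _nbrs(cell[0], cell[1]):
--         if board[m[0]][m[1]] == target and m not in comp:
--             _flood(board, target, m, comp)
--
-- def vay(board, pos, ev):  # third parameter is A's `eval` (renamed: shadowing a builtin)
--     px, py = pos
--     target = -board[px][py]
--     if target == 0:
--         return ev
--     comps = []
--     for n in _nbrs(px, py):
--         if board[n[0]][n[1]] == target and not any(n in comp for comp in comps):
--             comp = []
--             _flood(board, target, n, comp)
--             comps.append(comp)
--     for comp in comps:
--         if not any(board[m[0]][m[1]] == 0 for q in comp for m in _nbrs(q[0], q[1])):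
--             for (r, c) in comp:
--                 board[r][c] = -target
--             ev -= len(comp) * 2 * target
--     return ev
-- ===== Notes on version B (the rewrite author's own statement) =====
-- stated objective: alternative
-- what changed: A's per-seed BFS with an explicit queue, a 5x5 visited grid and immediate per-component board mutation is replaced by a recursive DFS flood-fill over formula-computed adjacency (orthogonal plus diagonals on even parity), run in two phases: first collect all opponent components next to pos on the unmutated board, then flip the liberty-less ones and score.
import Mathlib
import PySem

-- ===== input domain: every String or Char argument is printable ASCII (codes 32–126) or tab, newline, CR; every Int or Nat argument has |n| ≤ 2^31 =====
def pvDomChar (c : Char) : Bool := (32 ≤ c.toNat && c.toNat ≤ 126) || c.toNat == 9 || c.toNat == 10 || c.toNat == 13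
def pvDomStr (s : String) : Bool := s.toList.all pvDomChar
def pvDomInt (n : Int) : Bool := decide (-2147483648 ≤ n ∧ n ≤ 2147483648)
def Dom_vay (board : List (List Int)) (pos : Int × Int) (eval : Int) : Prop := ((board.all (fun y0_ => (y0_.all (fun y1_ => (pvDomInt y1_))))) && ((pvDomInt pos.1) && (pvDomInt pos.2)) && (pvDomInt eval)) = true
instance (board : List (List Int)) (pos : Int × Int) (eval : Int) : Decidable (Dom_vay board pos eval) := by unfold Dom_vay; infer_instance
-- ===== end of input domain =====

-- B replaces A's per-seed BFS (explicit queue + 5x5 visited grid + per-component immediate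
-- board mutation) by a recursive DFS flood-fill over formula-computed adjacency, run in two
-- phases: first collect the opponent components adjacent to pos on the unmutated board, then
-- flip the liberty-less ones and score.  Both Pythons mutate `board` in place and leave it in
-- the same final state; the claim proved here is about the returned eval.

-- grid read g[i][j] / write g[i][j] = v; exact for the in-range indices Pre_ admits
def bget (g : List (List Int)) (p : Nat × Nat) : Int := (g.getD p.1 []).getD p.2 0
def bset (g : List (List Int)) (p : Nat × Nat) (v : Int) : List (List Int) :=
  g.set p.1 ((g.getD p.1 []).set p.2 v)

-- Python list-index normalisation (negative index wraps by the length); exact on the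
-- indices Pre_ admits
def pyIdx (len : Nat) (i : Int) : Nat := if i < 0 then (i + len).toNat else i.toNat

-- g[i][j] with Python index semantics (each level wraps by its own length)
def bgetI (g : List (List Int)) (p : Int × Int) : Int :=
  let row := g.getD (pyIdx g.length p.1) []
  row.getD (pyIdx row.length p.2) 0

-- ===== PORT A =====
-- module-level adjacency table (available_move)
def adjTable : List (List (List (Nat × Nat))) :=
  [[[(1, 0), (0, 1), (1, 1)],
    [(1, 1), (0, 2), (0, 0)],
    [(1, 2), (0, 3), (0, 1), (1, 1), (1, 3)],
    [(1, 3), (0, 4), (0, 2)],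
    [(1, 4), (0, 3), (1, 3)]],
   [[(2, 0), (1, 1), (0, 0)],
    [(2, 1), (1, 2), (1, 0), (0, 1), (0, 0), (0, 2), (2, 0), (2, 2)],
    [(2, 2), (1, 3), (1, 1), (0, 2)],
    [(2, 3), (1, 4), (1, 2), (0, 3), (0, 2), (0, 4), (2, 2), (2, 4)],
    [(2, 4), (1, 3), (0, 4)]],
   [[(3, 0), (2, 1), (1, 0), (1, 1), (3, 1)],
    [(3, 1), (2, 2), (2, 0), (1, 1)],
    [(3, 2), (2, 3), (2, 1), (1, 2), (1, 1), (1, 3), (3, 1), (3, 3)],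
    [(3, 3), (2, 4), (2, 2), (1, 3)],
    [(3, 4), (2, 3), (1, 4), (1, 3), (3, 3)]],
   [[(4, 0), (3, 1), (2, 0)],
    [(4, 1), (3, 2), (3, 0), (2, 1), (2, 0), (2, 2), (4, 0), (4, 2)],
    [(4, 2), (3, 3), (3, 1), (2, 2)],
    [(4, 3), (3, 4), (3, 2), (2, 3), (2, 2), (2, 4), (4, 2), (4, 4)],
    [(4, 4), (3, 3), (2, 4)]],
   [[(4, 1), (3, 0), (3, 1)],
    [(4, 2), (4, 0), (3, 1)],
    [(4, 3), (4, 1), (3, 2), (3, 1), (3, 3)],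
    [(4, 4), (4, 2), (3, 3)],
    [(4, 3), (3, 4), (3, 3)]]]

def adjAt (p : Nat × Nat) : List (Nat × Nat) := (adjTable.getD p.1 []).getD p.2 []

-- available_move[pos_x][pos_y] with Python index semantics (the table is 5x5)
def adjAtI (p : Int × Int) : List (Nat × Nat) :=
  (adjTable.getD (pyIdx 5 p.1) []).getD (pyIdx 5 p.2) []

-- the body of A's `for index in available_move[temp[0]][temp[1]]` loop;
-- state = (queue, Visited, component, ans)
def bfsStep (b : List (List Int)) (value : Int)
    (st : List (Nat × Nat) × List (List Int) × List (Nat × Nat) × Bool) (n : Nat × Nat) :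
    List (Nat × Nat) × List (List Int) × List (Nat × Nat) × Bool :=
  if bget st.2.1 n ≠ 0 then st
  else if bget b n = 0 then (st.1, st.2.1, st.2.2.1, true)
  else if bget b n = value then (st.1 ++ [n], bset st.2.1 n 1, st.2.2.1 ++ [n], st.2.2.2)
  else st

-- A's `while len(queue) > 0` loop; the fuel 25 only makes it total: under Pre_ each cell is
-- enqueued at most once, so at most 25 iterations ever run (proved below)
def bfsLoop (b : List (List Int)) (value : Int) :
    Nat → List (Nat × Nat) → List (List Int) → List (Nat × Nat) → Bool →
    List (List Int) × List (Nat × Nat) × Bool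
  | 0, _, V, comp, ans => (V, comp, ans)
  | _ + 1, [], V, comp, ans => (V, comp, ans)
  | fuel + 1, t :: rest, V, comp, ans =>
      let st := (adjAt t).foldl (bfsStep b value) (rest, V, comp, ans)
      bfsLoop b value fuel st.1 st.2.1 st.2.2.1 st.2.2.2

-- A's check_component; Python mutates board/Visited in place, so the port returns
-- (board, Visited, eval)
def check_component (b : List (List Int)) (V : List (List Int)) (p : Nat × Nat) (eval : Int) :
    List (List Int) × List (List Int) × Int :=
  let value := bget b p
  let r := bfsLoop b value 25 [p] (bset V p 1) [p] false
  if r.2.2 = false then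
    (r.2.1.foldl (fun bb n => bset bb n (-value)) b, r.1, eval - (r.2.1.length : Int) * 2 * value)
  else (b, r.1, eval)

def vay (board : List (List Int)) (pos : Int × Int) (eval : Int) : Int :=
  let px := pos.1
  let py := pos.2
  let r := (adjAtI (px, py)).foldl
    (fun (st : List (List Int) × List (List Int) × Int) n =>
      if bget st.1 n = -(bgetI st.1 (px, py)) ∧ bget st.2.1 n = 0 then
        check_component st.1 st.2.1 n st.2.2
      else st)
    (board, [[0,0,0,0,0],[0,0,0,0,0],[0,0,0,0,0],[0,0,0,0,0],[0,0,0,0,0]], eval)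
  r.2.2

-- ===== PORT B =====
-- B's _nbrs: adjacency computed by formula (orthogonal, plus diagonals on even parity)
def nbrsI (p : Int × Int) : List (Nat × Nat) :=
  let r : Int := p.1
  let c : Int := p.2
  let deltas : List (Int × Int) :=
    [(1, 0), (0, 1), (0, -1), (-1, 0)] ++
      (if (r + c) % 2 = 0 then [(-1, -1), (-1, 1), (1, -1), (1, 1)] else [])
  (deltas.filter (fun d => 0 ≤ r + d.1 ∧ r + d.1 < 5 ∧ 0 ≤ c + d.2 ∧ c + d.2 < 5)).map
    (fun d => ((r + d.1).toNat, (c + d.2).toNat))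

def nbrs (p : Nat × Nat) : List (Nat × Nat) := nbrsI ((p.1 : Int), (p.2 : Int))

-- B's recursive _flood; the fuel only makes the recursion total: each call adds a new cell
-- to comp, so the depth never exceeds 25 (the 0-branch is unreachable from vay_alt)
def flood (b : List (List Int)) (target : Int) :
    Nat → (Nat × Nat) → List (Nat × Nat) → List (Nat × Nat)
  | 0, _, comp => comp
  | fuel + 1, cell, comp =>
      (nbrs cell).foldl
        (fun comp m => if bget b m = target ∧ ¬ m ∈ comp then flood b target fuel m comp
                       else comp)
        (comp ++ [cell])

def vay_alt (board : List (List Int)) (pos : Int × Int) (eval : Int) : Int :=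
  let px := pos.1
  let py := pos.2
  let target := -(bgetI board (px, py))
  if target = 0 then eval
  else
    let comps := (nbrsI (px, py)).foldl
      (fun (comps : List (List (Nat × Nat))) n =>
        if bget board n = target ∧ (∀ C ∈ comps, ¬ n ∈ C) then
          comps ++ [flood board target 25 n []]
        else comps) []
    let r := comps.foldl
      (fun (st : List (List Int) × Int) comp =>
        if comp.any (fun q => (nbrs q).any (fun m => bget st.1 m == 0)) then st
        else (comp.foldl (fun bb qc => bset bb qc (-target)) st.1,
              st.2 - (comp.length : Int) * 2 * target))
      (board, eval)
    r.2

-- ===== PRECONDITION & SPEC =====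
-- a cell of the 5x5 grid that really exists on this (possibly ragged) board
def cellOK (board : List (List Int)) (n : Nat × Nat) : Prop :=
  n.1 < board.length ∧ n.2 < (board.getD n.1 []).length

-- board[pos[0]][pos[1]] is readable in Python (negative indices wrap)
def posOK (board : List (List Int)) (pos : Int × Int) : Prop :=
  -(board.length : Int) ≤ pos.1 ∧ pos.1 < board.length ∧
  -((board.getD (pyIdx board.length pos.1) []).length : Int) ≤ pos.2 ∧
  pos.2 < (board.getD (pyIdx board.length pos.1) []).length

-- Pre_ admits two classes of inputs, together the inputs on which A's value is well defined:
-- (1) the game's natural domain — a board whose first five rows have at least five entries and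
--     a position inside the 5x5 grid — where the full capture logic runs; and
-- (2) the no-capture class — any readable position (possibly via Python's negative-index
--     wraparound) none of whose table or formula neighbours holds the opponent colour, so both
--     programs return eval unchanged.
-- Excluded: positions ≥ 5 (A raises IndexError), unreadable cells (A raises IndexError), and
-- ragged/wrapped inputs on which an actual capture check runs — there A's value depends on
-- which cells its traversal happens to reach on a malformed board, accidental behaviour that
-- is not worth specifying (B may differ or raise).
def Pre_vay (board : List (List Int)) (pos : Int × Int) (eval : Int) : Prop :=
  (5 ≤ board.length ∧ (∀ i, i < 5 → 5 ≤ (board.getD i []).length) ∧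
    0 ≤ pos.1 ∧ pos.1 < 5 ∧ 0 ≤ pos.2 ∧ pos.2 < 5) ∨
  (-5 ≤ pos.1 ∧ pos.1 < 5 ∧ -5 ≤ pos.2 ∧ pos.2 < 5 ∧ posOK board pos ∧
    (∀ n ∈ adjAtI (pos.1, pos.2), cellOK board n ∧ bget board n ≠ -(bgetI board (pos.1, pos.2))) ∧
    (∀ n ∈ nbrsI (pos.1, pos.2), cellOK board n ∧ bget board n ≠ -(bgetI board (pos.1, pos.2))))
instance (board : List (List Int)) (pos : Int × Int) (eval : Int) : Decidable (Pre_vay board pos eval) := by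
  unfold Pre_vay posOK cellOK; infer_instance

def pvWitness_vay : List (List Int) × (Int × Int) × Int :=
  ([[0, 1, -1, 0, 0], [0, 0, 0, 0, 0], [0, 0, 2, 0, 0], [0, 0, 0, 0, 0], [0, 0, 0, 0, 0]], (1, 2), 0)

def Spec_vay (board : List (List Int)) (pos : Int × Int) (eval : Int) (out : Int) : Prop := out = vay_alt board pos eval
instance (board : List (List Int)) (pos : Int × Int) (eval : Int) (out : Int) : Decidable (Spec_vay board pos eval out) := by unfold Spec_vay; infer_instance

-- ===== CLAIM (what is proved, stated in full; the proofs are below) =====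
def Claim_equal_vay : Prop := ∀ (board : List (List Int)) (pos : Int × Int) (eval : Int), Dom_vay board pos eval → Pre_vay board pos eval → Spec_vay board pos eval (vay board pos eval)

-- ===== LEMMAS AND PROOFS =====

-- the 25 cells of the board
def cells : List (Nat × Nat) :=
  [(0,0),(0,1),(0,2),(0,3),(0,4),
   (1,0),(1,1),(1,2),(1,3),(1,4),
   (2,0),(2,1),(2,2),(2,3),(2,4),
   (3,0),(3,1),(3,2),(3,3),(3,4),
   (4,0),(4,1),(4,2),(4,3),(4,4)]

def ShapeOK (g : List (List Int)) : Prop :=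
  5 ≤ g.length ∧ ∀ i, i < 5 → 5 ≤ (g.getD i []).length

-- liberty of a component on a board, as computed by B's phase 2
def libB (bo : List (List Int)) (C : List (Nat × Nat)) : Bool :=
  C.any (fun q => (nbrs q).any (fun m => bget bo m == 0))

def capFilter (bo : List (List Int)) (comps : List (List (Nat × Nat))) :
    List (List (Nat × Nat)) :=
  comps.filter (fun C => !libB bo C)

def capSum (bo : List (List Int)) (t : Int) (comps : List (List (Nat × Nat))) : Int :=
  ((capFilter bo comps).map (fun C => (C.length : Int) * 2 * t)).sum

-- a full same-coloured component: nodup, in cells, t-valued, closed under t-edges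
def GoodComp (bo : List (List Int)) (t : Int) (C : List (Nat × Nat)) : Prop :=
  C.Nodup ∧ (∀ x ∈ C, x ∈ cells) ∧ (∀ x ∈ C, bget bo x = t) ∧
  (∀ x ∈ C, ∀ m ∈ nbrs x, bget bo m = t → m ∈ C)

-- joint invariant of the (shared) outer loop: A-state (bA, V, evA) vs B's components list
structure JInv (bo : List (List Int)) (t : Int) (comps : List (List (Nat × Nat)))
    (bA V : List (List Int)) (evA ev0 : Int) : Prop where
  shapeA : ShapeOK bA
  shapeV : ShapeOK V
  good : ∀ C ∈ comps, GoodComp bo t C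
  vchar : ∀ p ∈ cells, bget V p = if p ∈ comps.flatten then 1 else 0
  bchar : ∀ p ∈ cells, bget bA p = if p ∈ (capFilter bo comps).flatten then -t else bget bo p
  ev : evA = ev0 - capSum bo t comps

-- ---------- finite facts about the fixed 5x5 graph ----------
theorem mem_cells_of_lt : ∀ p : Nat × Nat, p.1 < 5 → p.2 < 5 → p ∈ cells := by
  rintro ⟨a, b⟩ h1 h2
  interval_cases a <;> interval_cases b <;> decide

theorem adj_eq_nbrs : ∀ p ∈ cells, adjAt p = nbrs p := by decide

theorem nbrs_mem_cells : ∀ p ∈ cells, ∀ n ∈ nbrs p, n ∈ cells := by decide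

theorem nbrs_symm : ∀ p ∈ cells, ∀ q ∈ cells, (q ∈ nbrs p ↔ p ∈ nbrs q) := by decide

theorem full_of_length (l : List (Nat × Nat)) (hn : l.Nodup) (hsub : ∀ x ∈ l, x ∈ cells)
    (hlen : 25 ≤ l.length) : ∀ y ∈ cells, y ∈ l := by
  have h1 : l.toFinset.card = l.length := List.toFinset_card_of_nodup hn
  have h2 : l.toFinset ⊆ cells.toFinset := by
    intro x hx; rw [List.mem_toFinset] at *; exact hsub x hx
  have h4 : cells.toFinset.card = 25 := by decide
  have heq : l.toFinset = cells.toFinset := Finset.eq_of_subset_of_card_le h2 (by omega)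
  intro y hy
  have : y ∈ l.toFinset := by rw [heq, List.mem_toFinset]; exact hy
  simpa using this

theorem length_le_25 (l : List (Nat × Nat)) (hn : l.Nodup) (hsub : ∀ x ∈ l, x ∈ cells) :
    l.length ≤ 25 := by
  have h1 : l.toFinset.card = l.length := List.toFinset_card_of_nodup hn
  have h2 : l.toFinset ⊆ cells.toFinset := by
    intro x hx; rw [List.mem_toFinset] at *; exact hsub x hx
  have h3 := Finset.card_le_card h2
  have h4 : cells.toFinset.card = 25 := by decide
  omega

theorem length_eq_of_mem_iff (l1 l2 : List (Nat × Nat)) (h1 : l1.Nodup) (h2 : l2.Nodup)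
    (h : ∀ x, x ∈ l1 ↔ x ∈ l2) : l1.length = l2.length :=
  ((List.perm_ext_iff_of_nodup h1 h2).2 h).length_eq

-- ---------- grid lemmas ----------
theorem cells_bounds : ∀ p ∈ cells, p.1 < 5 ∧ p.2 < 5 := by decide

theorem getD_set_self (g : List (List Int)) (i : Nat) (r : List Int) (h : i < g.length) :
    (g.set i r).getD i [] = r := by
  simp [List.getD, List.getElem?_set_self h]

theorem getD_set_ne (g : List (List Int)) (i j : Nat) (r : List Int) (h : i ≠ j) :
    (g.set i r).getD j [] = g.getD j [] := by
  simp [List.getD, List.getElem?_set_ne h]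

theorem rowD_set_self (r : List Int) (j : Nat) (v : Int) (h : j < r.length) :
    (r.set j v).getD j 0 = v := by
  simp [List.getD, List.getElem?_set_self h]

theorem rowD_set_ne (r : List Int) (j k : Nat) (v : Int) (h : j ≠ k) :
    (r.set j v).getD k 0 = r.getD k 0 := by
  simp [List.getD, List.getElem?_set_ne h]

theorem shape_bset {g : List (List Int)} (hg : ShapeOK g) {p : Nat × Nat} (hp : p ∈ cells)
    (v : Int) : ShapeOK (bset g p v) := by
  obtain ⟨hp1, hp2⟩ := cells_bounds p hp
  obtain ⟨h1, h2⟩ := hg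
  refine ⟨by simpa [bset] using h1, ?_⟩
  intro i hi
  by_cases hip : p.1 = i
  · subst hip
    rw [bset, getD_set_self g p.1 _ (by omega), List.length_set]
    exact h2 p.1 hi
  · rw [bset, getD_set_ne g p.1 i _ hip]; exact h2 i hi

theorem bget_bset {g : List (List Int)} (hg : ShapeOK g) {p : Nat × Nat} (hp : p ∈ cells)
    (v : Int) (q : Nat × Nat) :
    bget (bset g p v) q = if q = p then v else bget g q := by
  obtain ⟨hp1, hp2⟩ := cells_bounds p hp
  obtain ⟨h1, h2⟩ := hg
  by_cases hr : p.1 = q.1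
  · rw [bset, bget, ← hr, getD_set_self g p.1 _ (by omega)]
    by_cases hc : p.2 = q.2
    · have hq : q = p := Prod.ext (hr.symm) (hc.symm)
      rw [if_pos hq, ← hc, rowD_set_self _ _ _ (by have := h2 p.1 hp1; omega)]
    · have hq : ¬ q = p := by intro h; exact hc (by rw [h])
      rw [if_neg hq, rowD_set_ne _ _ _ _ hc, bget, ← hr]
  · have hq : ¬ q = p := by intro h; exact hr (by rw [h])
    rw [bset, bget, getD_set_ne g p.1 q.1 _ hr, if_neg hq, bget]

theorem bget_foldl_bset (v : Int) :
    ∀ (l : List (Nat × Nat)) (g : List (List Int)), ShapeOK g → (∀ x ∈ l, x ∈ cells) →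
      ShapeOK (l.foldl (fun bb qc => bset bb qc v) g) ∧
      ∀ q, bget (l.foldl (fun bb qc => bset bb qc v) g) q = if q ∈ l then v else bget g q := by
  intro l
  induction l with
  | nil => intro g hg _; exact ⟨hg, fun q => by simp⟩
  | cons x l ih =>
    intro g hg hc
    have hx : x ∈ cells := hc x (by simp)
    have hg' : ShapeOK (bset g x v) := shape_bset hg hx v
    obtain ⟨hs, hb⟩ := ih (bset g x v) hg' (fun y hy => hc y (by simp [hy]))
    refine ⟨hs, fun q => ?_⟩
    rw [List.foldl_cons, hb q, bget_bset hg hx v q]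
    by_cases h1 : q ∈ l <;> by_cases h2 : q = x <;> simp [h1, h2]

-- ---------- generic fold lemmas ----------
theorem foldl_prefix {α β : Type} (g : List α → β → List α)
    (hg : ∀ a m, a <+: g a m) : ∀ (ns : List β) (a : List α), a <+: ns.foldl g a := by
  intro ns
  induction ns with
  | nil => intro a; exact List.prefix_refl a
  | cons m ns ih => intro a; exact (hg a m).trans (ih (g a m))

theorem foldl_pres {α β : Type} (Q : α → Prop) (g : α → β → α) :
    ∀ (ns : List β), (∀ a m, m ∈ ns → Q a → Q (g a m)) → ∀ a, Q a → Q (ns.foldl g a) := by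
  intro ns
  induction ns with
  | nil => intro _ a h; exact h
  | cons m ns ih =>
    intro hstep a h
    exact ih (fun a' m' hm' => hstep a' m' (by simp [hm'])) (g a m) (hstep a m (by simp) h)

theorem foldl_fixed {α β : Type} (f : α → β → α) (a : α) :
    ∀ ns : List β, (∀ n ∈ ns, f a n = a) → ns.foldl f a = a := by
  intro ns
  induction ns with
  | nil => intro _; rfl
  | cons n ns ih =>
    intro h
    rw [List.foldl_cons, h n (by simp)]
    exact ih (fun k hk => h k (by simp [hk]))

-- for a non-negative position, Python indexing is plain indexing
theorem bgetI_nonneg (g : List (List Int)) (pos : Int × Int) (h1 : 0 ≤ pos.1)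
    (h2 : 0 ≤ pos.2) : bgetI g pos = bget g (pos.1.toNat, pos.2.toNat) := by
  simp only [bgetI, bget, pyIdx]
  rw [if_neg (by omega), if_neg (by omega)]

theorem adjAtI_nonneg (pos : Int × Int) (h1 : 0 ≤ pos.1) (h2 : 0 ≤ pos.2) :
    adjAtI pos = adjAt (pos.1.toNat, pos.2.toNat) := by
  simp only [adjAtI, adjAt, pyIdx]
  rw [if_neg (by omega), if_neg (by omega)]

theorem nbrsI_nonneg (pos : Int × Int) (h1 : 0 ≤ pos.1) (h2 : 0 ≤ pos.2) :
    nbrsI pos = nbrs (pos.1.toNat, pos.2.toNat) := by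
  have hp : (((pos.1.toNat : Int)), ((pos.2.toNat : Int))) = (pos.1, pos.2) := by
    rw [Int.toNat_of_nonneg h1, Int.toNat_of_nonneg h2]
  rw [nbrs, hp]

-- ---------- flood (port B's DFS) lemmas ----------
theorem flood_prefix (b : List (List Int)) (t : Int) :
    ∀ (f : Nat) (cell : Nat × Nat) (comp : List (Nat × Nat)),
      comp <+: flood b t f cell comp := by
  intro f
  induction f with
  | zero => intro cell comp; simp [flood]
  | succ f ih =>
    intro cell comp
    have step : ∀ (a : List (Nat × Nat)) (m : Nat × Nat),
        a <+: (if bget b m = t ∧ ¬ m ∈ a then flood b t f m a else a) := by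
      intro a m
      by_cases h : bget b m = t ∧ ¬ m ∈ a
      · simpa [h] using ih m a
      · simp [h]
    have h2 := foldl_prefix _ step (nbrs cell) (comp ++ [cell])
    simp only [flood]
    exact (List.prefix_append comp [cell]).trans h2

theorem flood_mem (b : List (List Int)) (t : Int) (f : Nat) (cell : Nat × Nat)
    (comp : List (Nat × Nat)) (hf : 0 < f) : cell ∈ flood b t f cell comp := by
  obtain ⟨f, rfl⟩ := Nat.exists_eq_succ_of_ne_zero (by omega : f ≠ 0)
  have step : ∀ (a : List (Nat × Nat)) (m : Nat × Nat),
      a <+: (if bget b m = t ∧ ¬ m ∈ a then flood b t f m a else a) := by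
    intro a m
    by_cases h : bget b m = t ∧ ¬ m ∈ a
    · simpa [h] using flood_prefix b t f m a
    · simp [h]
  have h2 := foldl_prefix _ step (nbrs cell) (comp ++ [cell])
  simp only [flood]
  exact h2.subset (by simp)

theorem flood_all (b : List (List Int)) (t : Int) (Q : Nat × Nat → Prop)
    (hstep : ∀ p m, Q p → m ∈ nbrs p → bget b m = t → Q m) :
    ∀ (f : Nat) (cell : Nat × Nat) (comp : List (Nat × Nat)), Q cell → (∀ x ∈ comp, Q x) →
      ∀ x ∈ flood b t f cell comp, Q x := by
  intro f
  induction f with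
  | zero => intro cell comp _ hcomp x hx; exact hcomp x (by simpa [flood] using hx)
  | succ f ih =>
    intro cell comp hQ hcomp
    simp only [flood]
    refine foldl_pres (fun a => ∀ x ∈ a, Q x) _ (nbrs cell) ?_ (comp ++ [cell]) ?_
    · intro a m hm ha
      by_cases h : bget b m = t ∧ ¬ m ∈ a
      · simpa [h] using ih m a (hstep cell m hQ hm h.1) ha
      · simpa [h] using ha
    · intro x hx
      rcases List.mem_append.1 hx with h | h
      · exact hcomp x h
      · simp at h; subst h; exact hQ

theorem flood_nodup (b : List (List Int)) (t : Int) :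
    ∀ (f : Nat) (cell : Nat × Nat) (comp : List (Nat × Nat)),
      comp.Nodup → ¬ cell ∈ comp → (flood b t f cell comp).Nodup := by
  intro f
  induction f with
  | zero => intro cell comp h _; simpa [flood] using h
  | succ f ih =>
    intro cell comp h hc
    simp only [flood]
    refine foldl_pres List.Nodup _ (nbrs cell) ?_ (comp ++ [cell]) ?_
    · intro a m _ ha
      by_cases hg : bget b m = t ∧ ¬ m ∈ a
      · simpa [hg] using ih m a ha hg.2
      · simpa [hg] using ha
    · rw [List.nodup_append]
      refine ⟨h, List.nodup_singleton _, ?_⟩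
      intro x hx y hy
      have hyc : y = cell := by simpa using hy
      subst hyc
      intro hEq; subst hEq; exact hc hx

theorem flood_closed (b : List (List Int)) (t : Int) :
    ∀ (f : Nat) (cell : Nat × Nat) (comp : List (Nat × Nat)),
      comp.Nodup → ¬ cell ∈ comp → (∀ x ∈ comp, x ∈ cells) → cell ∈ cells →
      25 ≤ f + comp.length →
      ∀ x ∈ flood b t f cell comp, x ∈ comp ∨
        (∀ m ∈ nbrs x, bget b m = t → m ∈ flood b t f cell comp) := by
  intro f
  induction f with
  | zero =>
    intro cell comp hnd hcm hcc hcell hlen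
    exact absurd (full_of_length comp hnd hcc (by omega) cell hcell) hcm
  | succ f ih =>
    intro cell comp hnd hcm hcc hcell hlen
    have aux : ∀ (ns : List (Nat × Nat)), (∀ n ∈ ns, n ∈ cells) →
        ∀ (acc : List (Nat × Nat)), acc.Nodup → (∀ x ∈ acc, x ∈ cells) →
        25 ≤ f + acc.length →
        acc <+: (ns.foldl (fun comp m =>
            if bget b m = t ∧ ¬ m ∈ comp then flood b t f m comp else comp) acc) ∧
        (ns.foldl (fun comp m =>
            if bget b m = t ∧ ¬ m ∈ comp then flood b t f m comp else comp) acc).Nodup ∧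
        (∀ x ∈ (ns.foldl (fun comp m =>
            if bget b m = t ∧ ¬ m ∈ comp then flood b t f m comp else comp) acc), x ∈ cells) ∧
        (∀ x ∈ (ns.foldl (fun comp m =>
            if bget b m = t ∧ ¬ m ∈ comp then flood b t f m comp else comp) acc),
          x ∈ acc ∨ (∀ m ∈ nbrs x, bget b m = t → m ∈ (ns.foldl (fun comp m =>
            if bget b m = t ∧ ¬ m ∈ comp then flood b t f m comp else comp) acc))) ∧
        (∀ m ∈ ns, bget b m = t → m ∈ (ns.foldl (fun comp m =>
            if bget b m = t ∧ ¬ m ∈ comp then flood b t f m comp else comp) acc)) := by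
      intro ns
      induction ns with
      | nil =>
        intro _ acc h1 h2 _
        exact ⟨List.prefix_refl acc, h1, h2, fun x hx => Or.inl hx, by simp⟩
      | cons m ns ihns =>
        intro hnsc acc h1 h2 h3
        have hmc : m ∈ cells := hnsc m (by simp)
        simp only [List.foldl_cons]
        by_cases hg : bget b m = t ∧ ¬ m ∈ acc
        · have hf : 0 < f := by
            rcases Nat.eq_zero_or_pos f with h0 | h; swap; · exact h
            exfalso
            exact hg.2 (full_of_length acc h1 h2 (by omega) m hmc)
          have hpre : acc <+: flood b t f m acc := flood_prefix b t f m acc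
          have hmm : m ∈ flood b t f m acc := flood_mem b t f m acc hf
          have hnd' : (flood b t f m acc).Nodup := flood_nodup b t f m acc h1 hg.2
          have hcc' : ∀ x ∈ flood b t f m acc, x ∈ cells :=
            flood_all b t (· ∈ cells) (fun p k hp hk _ => nbrs_mem_cells p hp k hk)
              f m acc hmc h2
          have hlen' : 25 ≤ f + (flood b t f m acc).length := by
            have := hpre.length_le; omega
          have hcl' := ih m acc h1 hg.2 h2 hmc (by omega)
          obtain ⟨p1, p2, p3, p4, p5⟩ :=
            ihns (fun n hn => hnsc n (by simp [hn])) (flood b t f m acc) hnd' hcc' hlen'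
          rw [if_pos hg]
          refine ⟨hpre.trans p1, p2, p3, ?_, ?_⟩
          · intro x hx
            rcases p4 x hx with hx' | hdone
            · rcases hcl' x hx' with hxa | hdone'
              · exact Or.inl hxa
              · exact Or.inr (fun k hk hbk => p1.subset (hdone' k hk hbk))
            · exact Or.inr hdone
          · intro k hk hbk
            rcases List.mem_cons.1 hk with rfl | hk'
            · exact p1.subset hmm
            · exact p5 k hk' hbk
        · rw [if_neg hg]
          obtain ⟨p1, p2, p3, p4, p5⟩ := ihns (fun n hn => hnsc n (by simp [hn])) acc h1 h2 h3
          refine ⟨p1, p2, p3, p4, ?_⟩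
          intro k hk hbk
          rcases List.mem_cons.1 hk with rfl | hk'
          · have : k ∈ acc := by
              by_contra hkn
              exact hg ⟨hbk, hkn⟩
            exact p1.subset this
          · exact p5 k hk' hbk
    simp only [flood]
    have hns : ∀ n ∈ nbrs cell, n ∈ cells := nbrs_mem_cells cell hcell
    have hacc : (comp ++ [cell]).Nodup := by
      rw [List.nodup_append]
      refine ⟨hnd, List.nodup_singleton _, ?_⟩
      intro x hx y hy
      have hyc : y = cell := by simpa using hy
      subst hyc
      intro hEq; subst hEq; exact hcm hx
    have haccc : ∀ x ∈ comp ++ [cell], x ∈ cells := by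
      intro x hx
      rcases List.mem_append.1 hx with h | h
      · exact hcc x h
      · simp at h; subst h; exact hcell
    have hlen' : 25 ≤ f + (comp ++ [cell]).length := by
      rw [List.length_append, List.length_cons, List.length_nil]; omega
    obtain ⟨p1, p2, p3, p4, p5⟩ := aux (nbrs cell) hns (comp ++ [cell]) hacc haccc hlen'
    intro x hx
    rcases p4 x hx with hx' | hdone
    · rcases List.mem_append.1 hx' with h | h
      · exact Or.inl h
      · simp at h; subst h
        exact Or.inr (fun m hm hbm => p5 m hm hbm)
    · exact Or.inr hdone

-- the canonical component of a seed n on board bo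
theorem comp_good (bo : List (List Int)) (t : Int) (n : Nat × Nat) (hn : n ∈ cells)
    (hbn : bget bo n = t) : GoodComp bo t (flood bo t 25 n []) := by
  refine ⟨flood_nodup bo t 25 n [] (by simp) (by simp), ?_, ?_, ?_⟩
  · exact flood_all bo t (· ∈ cells) (fun p k hp hk _ => nbrs_mem_cells p hp k hk)
      25 n [] hn (by simp)
  · exact flood_all bo t (fun x => bget bo x = t) (fun p k _ _ hbk => hbk)
      25 n [] hbn (by simp)
  · intro x hx m hm hbm
    rcases flood_closed bo t 25 n [] (by simp) (by simp) (by simp) hn (by simp) x hx with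
      h | hdone
    · simp at h
    · exact hdone m hm hbm

theorem comp_seed_mem (bo : List (List Int)) (t : Int) (n : Nat × Nat) :
    n ∈ flood bo t 25 n [] := flood_mem bo t 25 n [] (by omega)

theorem comp_min (bo : List (List Int)) (t : Int) (P : Nat × Nat → Prop)
    (hP : ∀ x, P x → ∀ m ∈ nbrs x, bget bo m = t → P m) (n : Nat × Nat) (hn : P n) :
    ∀ x ∈ flood bo t 25 n [], P x :=
  flood_all bo t P (fun p m hp hm hb => hP p hp m hm hb) 25 n [] hn (by simp)

theorem comp_symm (bo : List (List Int)) (t : Int) (n : Nat × Nat) (hn : n ∈ cells)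
    (hbn : bget bo n = t) : ∀ x ∈ flood bo t 25 n [], n ∈ flood bo t 25 x [] := by
  have main := flood_all bo t
    (fun z => z ∈ cells ∧ bget bo z = t ∧ n ∈ flood bo t 25 z []) ?_ 25 n []
    ⟨hn, hbn, comp_seed_mem bo t n⟩ (by simp)
  · exact fun x hx => (main x hx).2.2
  · rintro p m ⟨hpc, hpt, hpn⟩ hm hbm
    have hmc : m ∈ cells := nbrs_mem_cells p hpc m hm
    refine ⟨hmc, hbm, ?_⟩
    have hGm := comp_good bo t m hmc hbm
    have hpm : p ∈ nbrs m := (nbrs_symm m hmc p hpc).2 hm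
    have hpKm : p ∈ flood bo t 25 m [] :=
      hGm.2.2.2 m (comp_seed_mem bo t m) p hpm hpt
    have := comp_min bo t (· ∈ flood bo t 25 m [])
      (fun x hx k hk hbk => hGm.2.2.2 x hx k hk hbk) p hpKm
    exact this n hpn

-- ---------- BFS (port A's queue loop) lemmas ----------
theorem bfs_scan (b : List (List Int)) (t : Int) (VS : List (Nat × Nat))
    (P : Nat × Nat → Prop) (ht : t ≠ 0)
    (hVSval : ∀ x ∈ VS, bget b x ≠ 0)
    (hsep : ∀ x ∈ cells, ¬ x ∈ VS → bget b x = t → ∀ m ∈ nbrs x, bget b m = t → ¬ m ∈ VS)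
    (c : Nat × Nat) (hcc : c ∈ cells) (hcVS : ¬ c ∈ VS) (hct : bget b c = t)
    (hPm : ∀ m ∈ nbrs c, bget b m = t → P m) :
    ∀ (ns : List (Nat × Nat)), (∀ m ∈ ns, m ∈ nbrs c) →
    ∀ (queue comp : List (Nat × Nat)) (V : List (List Int)) (ans : Bool),
      comp.Nodup → (∀ x ∈ comp, x ∈ cells ∧ bget b x = t ∧ ¬ x ∈ VS ∧ P x) → ShapeOK V →
      (∀ p ∈ cells, bget V p = if p ∈ VS ∨ p ∈ comp then 1 else 0) →
      ∃ new,
        (ns.foldl (bfsStep b t) (queue, V, comp, ans)).1 = queue ++ new ∧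
        (ns.foldl (bfsStep b t) (queue, V, comp, ans)).2.2.1 = comp ++ new ∧
        (comp ++ new).Nodup ∧
        (∀ x ∈ comp ++ new, x ∈ cells ∧ bget b x = t ∧ ¬ x ∈ VS ∧ P x) ∧
        ShapeOK (ns.foldl (bfsStep b t) (queue, V, comp, ans)).2.1 ∧
        (∀ p ∈ cells, bget (ns.foldl (bfsStep b t) (queue, V, comp, ans)).2.1 p =
          if p ∈ VS ∨ p ∈ comp ++ new then 1 else 0) ∧
        ((ns.foldl (bfsStep b t) (queue, V, comp, ans)).2.2.2 = true ↔
          (ans = true ∨ ∃ m ∈ ns, bget b m = 0)) ∧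
        (∀ m ∈ ns, bget b m = t → m ∈ comp ++ new) := by
  intro ns
  induction ns with
  | nil =>
    intro _ queue comp V ans h1 h2 h3 h4
    exact ⟨[], by simp, by simp, by simpa using h1, by simpa using h2, h3,
      by simpa using h4, by simp, by simp⟩
  | cons m ns ihns =>
    intro hns queue comp V ans h1 h2 h3 h4
    have hmn : m ∈ nbrs c := hns m (by simp)
    have hmc : m ∈ cells := nbrs_mem_cells c hcc m hmn
    have hns' : ∀ k ∈ ns, k ∈ nbrs c := fun k hk => hns k (by simp [hk])
    simp only [List.foldl_cons]
    by_cases hv : bget V m = 0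
    · -- Visited[m] == 0
      have hmVS : ¬ m ∈ VS ∧ ¬ m ∈ comp := by
        by_contra hcon
        have h0 := h4 m hmc
        rw [if_pos (by tauto)] at h0
        rw [hv] at h0
        exact absurd h0 (by norm_num)
      by_cases hb0 : bget b m = 0
      · -- liberty found: ans := true
        have hstep : bfsStep b t (queue, V, comp, ans) m = (queue, V, comp, true) := by
          simp [bfsStep, hv, hb0]
        rw [hstep]
        obtain ⟨new, p1, p2, p3, p4, p5, p6, p7, p8⟩ := ihns hns' queue comp V true h1 h2 h3 h4
        refine ⟨new, p1, p2, p3, p4, p5, p6, ?_, ?_⟩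
        · constructor
          · intro _; exact Or.inr ⟨m, by simp, hb0⟩
          · intro _; exact p7.2 (Or.inl rfl)
        · intro k hk hbk
          rcases List.mem_cons.1 hk with heq | hk'
          · rw [heq] at hbk
            rw [hbk] at hb0
            exact absurd hb0 ht
          · exact p8 k hk' hbk
      · by_cases hbt : bget b m = t
        · -- same colour: mark, enqueue, add to component
          have hstep : bfsStep b t (queue, V, comp, ans) m
              = (queue ++ [m], bset V m 1, comp ++ [m], ans) := by
            simp [bfsStep, hv, hb0, hbt, ht]
          rw [hstep]
          have h1' : (comp ++ [m]).Nodup := by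
            rw [List.nodup_append]
            refine ⟨h1, List.nodup_singleton _, ?_⟩
            intro x hx y hy
            have hyc : y = m := by simpa using hy
            subst hyc
            intro hEq; subst hEq; exact hmVS.2 hx
          have h2' : ∀ x ∈ comp ++ [m], x ∈ cells ∧ bget b x = t ∧ ¬ x ∈ VS ∧ P x := by
            intro x hx
            rcases List.mem_append.1 hx with h | h
            · exact h2 x h
            · have hxm : x = m := by simpa using h
              rw [hxm]
              exact ⟨hmc, hbt, hmVS.1, hPm m hmn hbt⟩
          have h3' : ShapeOK (bset V m 1) := shape_bset h3 hmc 1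
          have h4' : ∀ p ∈ cells, bget (bset V m 1) p =
              if p ∈ VS ∨ p ∈ comp ++ [m] then 1 else 0 := by
            intro p hp
            rw [bget_bset h3 hmc 1 p]
            by_cases hpm : p = m
            · have hmem : m ∈ VS ∨ m ∈ comp ++ [m] := Or.inr (List.mem_append.2 (Or.inr (by simp)))
              rw [hpm, if_pos rfl, if_pos hmem]
            · rw [if_neg hpm, h4 p hp]
              have hiff : (p ∈ VS ∨ p ∈ comp ++ [m]) ↔ (p ∈ VS ∨ p ∈ comp) := by
                constructor
                · rintro (h | h)
                  · exact Or.inl h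
                  · rcases List.mem_append.1 h with h' | h'
                    · exact Or.inr h'
                    · exact absurd (by simpa using h') hpm
                · rintro (h | h)
                  · exact Or.inl h
                  · exact Or.inr (List.mem_append.2 (Or.inl h))
              rw [if_congr hiff rfl rfl]
          obtain ⟨new', q1, q2, q3, q4, q5, q6, q7, q8⟩ :=
            ihns hns' (queue ++ [m]) (comp ++ [m]) (bset V m 1) ans h1' h2' h3' h4'
          refine ⟨m :: new', ?_, ?_, ?_, ?_, q5, ?_, ?_, ?_⟩
          · rw [q1, List.append_assoc]; rfl
          · rw [q2, List.append_assoc]; rfl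
          · rw [show comp ++ m :: new' = (comp ++ [m]) ++ new' by
              rw [List.append_assoc]; rfl]
            exact q3
          · rw [show comp ++ m :: new' = (comp ++ [m]) ++ new' by
              rw [List.append_assoc]; rfl]
            exact q4
          · intro p hp
            rw [q6 p hp,
              show comp ++ m :: new' = (comp ++ [m]) ++ new' by rw [List.append_assoc]; rfl]
          · rw [q7]
            have hm0 : ¬ bget b m = 0 := hb0
            constructor
            · rintro (h | ⟨k, hk, hbk⟩)
              · exact Or.inl h
              · exact Or.inr ⟨k, by simp [hk], hbk⟩
            · rintro (h | ⟨k, hk, hbk⟩)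
              · exact Or.inl h
              · rcases List.mem_cons.1 hk with heq | hk'
                · rw [heq] at hbk
                  exact absurd hbk hm0
                · exact Or.inr ⟨k, hk', hbk⟩
          · intro k hk hbk
            rw [show comp ++ m :: new' = (comp ++ [m]) ++ new' by
              rw [List.append_assoc]; rfl]
            rcases List.mem_cons.1 hk with heq | hk'
            · rw [heq]
              exact List.mem_append.2 (Or.inl (by simp))
            · exact q8 k hk' hbk
        · -- other colour: skipped
          have hstep : bfsStep b t (queue, V, comp, ans) m = (queue, V, comp, ans) := by
            simp [bfsStep, hv, hb0, hbt]
          rw [hstep]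
          obtain ⟨new, p1, p2, p3, p4, p5, p6, p7, p8⟩ := ihns hns' queue comp V ans h1 h2 h3 h4
          refine ⟨new, p1, p2, p3, p4, p5, p6, ?_, ?_⟩
          · rw [p7]
            constructor
            · rintro (h | ⟨k, hk, hbk⟩)
              · exact Or.inl h
              · exact Or.inr ⟨k, by simp [hk], hbk⟩
            · rintro (h | ⟨k, hk, hbk⟩)
              · exact Or.inl h
              · rcases List.mem_cons.1 hk with heq | hk'
                · rw [heq] at hbk
                  exact absurd hbk hb0
                · exact Or.inr ⟨k, hk', hbk⟩
          · intro k hk hbk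
            rcases List.mem_cons.1 hk with heq | hk'
            · rw [heq] at hbk
              exact absurd hbk hbt
            · exact p8 k hk' hbk
    · -- Visited[m] != 0 : skipped
      have hstep : bfsStep b t (queue, V, comp, ans) m = (queue, V, comp, ans) := by
        simp [bfsStep, hv]
      rw [hstep]
      obtain ⟨new, p1, p2, p3, p4, p5, p6, p7, p8⟩ := ihns hns' queue comp V ans h1 h2 h3 h4
      have hm' : m ∈ VS ∨ m ∈ comp := by
        by_contra hcon
        push_neg at hcon
        have h0 := h4 m hmc
        rw [if_neg (by rintro (h | h); exacts [hcon.1 h, hcon.2 h])] at h0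
        exact hv h0
      have hm0 : ¬ bget b m = 0 := by
        rcases hm' with h | h
        · exact hVSval m h
        · rw [(h2 m h).2.1]; exact fun h' => ht h'
      refine ⟨new, p1, p2, p3, p4, p5, p6, ?_, ?_⟩
      · rw [p7]
        constructor
        · rintro (h | ⟨k, hk, hbk⟩)
          · exact Or.inl h
          · exact Or.inr ⟨k, by simp [hk], hbk⟩
        · rintro (h | ⟨k, hk, hbk⟩)
          · exact Or.inl h
          · rcases List.mem_cons.1 hk with heq | hk'
            · rw [heq] at hbk
              exact absurd hbk hm0
            · exact Or.inr ⟨k, hk', hbk⟩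
      · intro k hk hbk
        rcases List.mem_cons.1 hk with heq | hk'
        · rw [heq] at hbk ⊢
          rcases hm' with h | h
          · exact absurd h (hsep c hcc hcVS hct m hmn hbk)
          · exact List.mem_append.2 (Or.inl h)
        · exact p8 k hk' hbk

theorem bfs_main (b : List (List Int)) (t : Int) (VS : List (Nat × Nat))
    (P : Nat × Nat → Prop) (ht : t ≠ 0)
    (hVSval : ∀ x ∈ VS, bget b x ≠ 0)
    (hsep : ∀ x ∈ cells, ¬ x ∈ VS → bget b x = t → ∀ m ∈ nbrs x, bget b m = t → ¬ m ∈ VS)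
    (hPcl : ∀ x, P x → ∀ m ∈ nbrs x, bget b m = t → P m) :
    ∀ (fuel : Nat) (done queue comp : List (Nat × Nat)) (V : List (List Int)) (ans : Bool),
      comp = done ++ queue → comp.Nodup →
      (∀ x ∈ comp, x ∈ cells ∧ bget b x = t ∧ ¬ x ∈ VS ∧ P x) → ShapeOK V →
      (∀ p ∈ cells, bget V p = if p ∈ VS ∨ p ∈ comp then 1 else 0) →
      (ans = true ↔ ∃ c ∈ done, ∃ m ∈ nbrs c, bget b m = 0) →
      (∀ c ∈ done, ∀ m ∈ nbrs c, bget b m = t → m ∈ comp) →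
      25 ≤ fuel + done.length →
      (∀ x ∈ comp, x ∈ (bfsLoop b t fuel queue V comp ans).2.1) ∧
      (bfsLoop b t fuel queue V comp ans).2.1.Nodup ∧
      (∀ x ∈ (bfsLoop b t fuel queue V comp ans).2.1,
        x ∈ cells ∧ bget b x = t ∧ ¬ x ∈ VS ∧ P x) ∧
      ShapeOK (bfsLoop b t fuel queue V comp ans).1 ∧
      (∀ p ∈ cells, bget (bfsLoop b t fuel queue V comp ans).1 p =
        if p ∈ VS ∨ p ∈ (bfsLoop b t fuel queue V comp ans).2.1 then 1 else 0) ∧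
      ((bfsLoop b t fuel queue V comp ans).2.2 = true ↔
        ∃ c ∈ (bfsLoop b t fuel queue V comp ans).2.1, ∃ m ∈ nbrs c, bget b m = 0) ∧
      (∀ c ∈ (bfsLoop b t fuel queue V comp ans).2.1, ∀ m ∈ nbrs c,
        bget b m = t → m ∈ (bfsLoop b t fuel queue V comp ans).2.1) := by
  intro fuel
  induction fuel with
  | zero =>
    intro done queue comp V ans hdq h2 h3 h4 h5 h6 h7 h8
    have hq : queue = [] := by
      have hle : comp.length ≤ 25 := length_le_25 comp h2 (fun x hx => (h3 x hx).1)
      rw [hdq, List.length_append] at hle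
      have : queue.length = 0 := by omega
      exact List.eq_nil_of_length_eq_zero this
    subst hq
    have hdc : done = comp := by rw [hdq, List.append_nil]
    subst hdc
    exact ⟨fun x hx => hx, h2, h3, h4, h5, h6, h7⟩
  | succ fuel ih =>
    intro done queue comp V ans hdq h2 h3 h4 h5 h6 h7 h8
    match queue with
    | [] =>
      have hdc : done = comp := by rw [hdq, List.append_nil]
      subst hdc
      exact ⟨fun x hx => hx, h2, h3, h4, h5, h6, h7⟩
    | c :: rest =>
      have hc : c ∈ comp := by rw [hdq]; exact List.mem_append.2 (Or.inr (by simp))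
      obtain ⟨hccell, hct, hcVS, hcP⟩ := h3 c hc
      have hPm : ∀ m ∈ nbrs c, bget b m = t → P m := fun m hm hbm => hPcl c hcP m hm hbm
      obtain ⟨new, p1, p2, p3, p4, p5, p6, p7, p8⟩ :=
        bfs_scan b t VS P ht hVSval hsep c hccell hcVS hct hPm (nbrs c)
          (fun m hm => hm) rest comp V ans h2 h3 h4 h5
      rw [show bfsLoop b t (fuel + 1) (c :: rest) V comp ans =
            bfsLoop b t fuel ((adjAt c).foldl (bfsStep b t) (rest, V, comp, ans)).1
              ((adjAt c).foldl (bfsStep b t) (rest, V, comp, ans)).2.1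
              ((adjAt c).foldl (bfsStep b t) (rest, V, comp, ans)).2.2.1
              ((adjAt c).foldl (bfsStep b t) (rest, V, comp, ans)).2.2.2 from rfl]
      rw [adj_eq_nbrs c hccell] at *
      rw [p1, p2]
      have hdq' : comp ++ new = (done ++ [c]) ++ (rest ++ new) := by
        rw [hdq]; simp
      have h6' : ((nbrs c).foldl (bfsStep b t) (rest, V, comp, ans)).2.2.2 = true ↔
          ∃ c' ∈ done ++ [c], ∃ m ∈ nbrs c', bget b m = 0 := by
        rw [p7, h6]
        constructor
        · rintro (⟨d, hd, hm⟩ | hm)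
          · exact ⟨d, List.mem_append.2 (Or.inl hd), hm⟩
          · exact ⟨c, List.mem_append.2 (Or.inr (by simp)), hm⟩
        · rintro ⟨d, hd, hm⟩
          rcases List.mem_append.1 hd with hd' | hd'
          · exact Or.inl ⟨d, hd', hm⟩
          · have : d = c := by simpa using hd'
            rw [this] at hm
            exact Or.inr hm
      have h7' : ∀ c' ∈ done ++ [c], ∀ m ∈ nbrs c', bget b m = t → m ∈ comp ++ new := by
        intro c' hc' m hm hbm
        rcases List.mem_append.1 hc' with hd | hd
        · exact List.mem_append.2 (Or.inl (h7 c' hd m hm hbm))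
        · have : c' = c := by simpa using hd
          rw [this] at hm
          exact p8 m hm hbm
      have h8' : 25 ≤ fuel + (done ++ [c]).length := by
        rw [List.length_append, List.length_cons, List.length_nil]; omega
      obtain ⟨r1, r2, r3, r4, r5, r6, r7⟩ :=
        ih (done ++ [c]) (rest ++ new) (comp ++ new)
          ((nbrs c).foldl (bfsStep b t) (rest, V, comp, ans)).2.1
          ((nbrs c).foldl (bfsStep b t) (rest, V, comp, ans)).2.2.2
          hdq' p3 p4 p5 p6 h6' h7' h8'
      exact ⟨fun x hx => r1 x (List.mem_append.2 (Or.inl hx)), r2, r3, r4, r5, r6, r7⟩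

-- ---------- the per-seed step, joint for A and B ----------
theorem libB_iff (bo : List (List Int)) (C : List (Nat × Nat)) :
    libB bo C = true ↔ ∃ x ∈ C, ∃ m ∈ nbrs x, bget bo m = 0 := by
  simp [libB, List.any_eq_true, beq_iff_eq]

theorem seed_step (bo : List (List Int)) (t : Int) (ht : t ≠ 0) (ev0 : Int)
    (comps : List (List (Nat × Nat))) (bA V : List (List Int)) (evA : Int)
    (J : JInv bo t comps bA V evA ev0) (n : Nat × Nat) (hn : n ∈ cells)
    (hbn : bget bo n = t) (hnv : ¬ n ∈ comps.flatten) :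
    JInv bo t (comps ++ [flood bo t 25 n []])
      (check_component bA V n evA).1 (check_component bA V n evA).2.1
      (check_component bA V n evA).2.2 ev0 := by
  have capsub : ∀ p, p ∈ (capFilter bo comps).flatten → p ∈ comps.flatten := by
    intro p hp
    rw [List.mem_flatten] at hp ⊢
    obtain ⟨C, hC, hpC⟩ := hp
    exact ⟨C, (List.mem_filter.1 hC).1, hpC⟩
  have F1 : ∀ x ∈ comps.flatten, x ∈ cells ∧ bget bo x = t := by
    intro x hx
    obtain ⟨C, hC, hxC⟩ := List.mem_flatten.1 hx
    exact ⟨(J.good C hC).2.1 x hxC, (J.good C hC).2.2.1 x hxC⟩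
  have F2 : ∀ p ∈ cells, ¬ p ∈ (capFilter bo comps).flatten → bget bA p = bget bo p := by
    intro p hp hpc
    rw [J.bchar p hp, if_neg hpc]
  have hncap : ¬ n ∈ (capFilter bo comps).flatten := fun h => hnv (capsub n h)
  have F3 : bget bA n = t := by rw [F2 n hn hncap]; exact hbn
  have Kgood := comp_good bo t n hn hbn
  have Kdisj : ∀ x ∈ flood bo t 25 n [], ¬ x ∈ comps.flatten := by
    intro x hx hxVS
    obtain ⟨C, hC, hxC⟩ := List.mem_flatten.1 hxVS
    have hsm := comp_symm bo t n hn hbn x hx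
    have hsubC := comp_min bo t (· ∈ C)
      (fun z hz k hk hbk => (J.good C hC).2.2.2 z hz k hk hbk) x hxC
    exact hnv (List.mem_flatten.2 ⟨C, hC, hsubC n hsm⟩)
  have hnegt : ¬ (-t = t) := by omega
  have F7 : ∀ x ∈ comps.flatten, bget bA x ≠ 0 := by
    intro x hx
    obtain ⟨hxc, hxt⟩ := F1 x hx
    by_cases hxcap : x ∈ (capFilter bo comps).flatten
    · rw [J.bchar x hxc, if_pos hxcap]; omega
    · rw [F2 x hxc hxcap, hxt]; exact ht
  have F8 : ∀ x ∈ cells, ¬ x ∈ comps.flatten → bget bA x = t →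
      ∀ m ∈ nbrs x, bget bA m = t → ¬ m ∈ comps.flatten := by
    intro x hxc hxVS hxt m hm hmt hmVS
    have hmc : m ∈ cells := nbrs_mem_cells x hxc m hm
    have hmcap : ¬ m ∈ (capFilter bo comps).flatten := by
      intro hcap
      rw [J.bchar m hmc, if_pos hcap] at hmt
      exact hnegt hmt
    have hbm : bget bo m = t := by rw [← F2 m hmc hmcap]; exact hmt
    obtain ⟨C, hC, hmC⟩ := List.mem_flatten.1 hmVS
    have hxm : x ∈ nbrs m := (nbrs_symm m hmc x hxc).2 hm
    have hxcap : ¬ x ∈ (capFilter bo comps).flatten := fun h => hxVS (capsub x h)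
    have hbx : bget bo x = t := by rw [← F2 x hxc hxcap]; exact hxt
    exact hxVS (List.mem_flatten.2 ⟨C, hC, (J.good C hC).2.2.2 m hmC x hxm hbx⟩)
  have F9 : ∀ x, x ∈ flood bo t 25 n [] → ∀ m ∈ nbrs x,
      bget bA m = t → m ∈ flood bo t 25 n [] := by
    intro x hx m hm hmt
    have hxc : x ∈ cells := Kgood.2.1 x hx
    have hmc : m ∈ cells := nbrs_mem_cells x hxc m hm
    have hmcap : ¬ m ∈ (capFilter bo comps).flatten := by
      intro hcap
      rw [J.bchar m hmc, if_pos hcap] at hmt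
      exact hnegt hmt
    have hbm : bget bo m = t := by rw [← F2 m hmc hmcap]; exact hmt
    exact Kgood.2.2.2 x hx m hm hbm
  -- the initial Visited grid of check_component
  have h4' : ShapeOK (bset V n 1) := shape_bset J.shapeV hn 1
  have h5' : ∀ p ∈ cells, bget (bset V n 1) p =
      if p ∈ comps.flatten ∨ p ∈ [n] then 1 else 0 := by
    intro p hp
    rw [bget_bset J.shapeV hn 1 p]
    by_cases hpn : p = n
    · rw [hpn, if_pos rfl, if_pos (Or.inr (by simp))]
    · rw [if_neg hpn, J.vchar p hp]
      have hiff : (p ∈ comps.flatten ∨ p ∈ [n]) ↔ p ∈ comps.flatten := by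
        constructor
        · rintro (h | h)
          · exact h
          · exact absurd (by simpa using h) hpn
        · exact Or.inl
      rw [if_congr hiff rfl rfl]
  obtain ⟨r1, r2, r3, r4, r5, r6, r7⟩ :=
    bfs_main bA t comps.flatten (· ∈ flood bo t 25 n []) ht F7 F8 F9
      25 [] [n] [n] (bset V n 1) false (by simp) (by simp)
      (by intro x hx
          have hxn : x = n := by simpa using hx
          rw [hxn]
          exact ⟨hn, F3, hnv, comp_seed_mem bo t n⟩)
      h4' h5' (by simp) (by simp) (by simp)
  have hKsub : ∀ x ∈ (bfsLoop bA t 25 [n] (bset V n 1) [n] false).2.1,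
      x ∈ flood bo t 25 n [] := fun x hx => (r3 x hx).2.2.2
  have hclosed' : ∀ z, z ∈ (bfsLoop bA t 25 [n] (bset V n 1) [n] false).2.1 →
      ∀ m ∈ nbrs z, bget bo m = t →
      m ∈ (bfsLoop bA t 25 [n] (bset V n 1) [n] false).2.1 := by
    intro z hz m hm hbm
    have hzc : z ∈ cells := (r3 z hz).1
    have hmc : m ∈ cells := nbrs_mem_cells z hzc m hm
    by_cases hmcap : m ∈ (capFilter bo comps).flatten
    · exfalso
      obtain ⟨C, hC, hmC⟩ := List.mem_flatten.1 (capsub m hmcap)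
      have hzm : z ∈ nbrs m := (nbrs_symm m hmc z hzc).2 hm
      have hzVS : ¬ z ∈ comps.flatten := (r3 z hz).2.2.1
      have hzcap : ¬ z ∈ (capFilter bo comps).flatten := fun h => hzVS (capsub z h)
      have hbz : bget bo z = t := by rw [← F2 z hzc hzcap]; exact (r3 z hz).2.1
      exact hzVS (List.mem_flatten.2 ⟨C, hC, (J.good C hC).2.2.2 m hmC z hzm hbz⟩)
    · have : bget bA m = t := by rw [F2 m hmc hmcap]; exact hbm
      exact r7 z hz m hm this
  have hKsup : ∀ x ∈ flood bo t 25 n [],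
      x ∈ (bfsLoop bA t 25 [n] (bset V n 1) [n] false).2.1 :=
    comp_min bo t (· ∈ (bfsLoop bA t 25 [n] (bset V n 1) [n] false).2.1)
      hclosed' n (r1 n (by simp))
  have hmemiff : ∀ x, x ∈ (bfsLoop bA t 25 [n] (bset V n 1) [n] false).2.1 ↔
      x ∈ flood bo t 25 n [] := fun x => ⟨hKsub x, hKsup x⟩
  have hlen : (bfsLoop bA t 25 [n] (bset V n 1) [n] false).2.1.length =
      (flood bo t 25 n []).length :=
    length_eq_of_mem_iff _ _ r2 Kgood.1 hmemiff
  have hzero : ∀ m ∈ cells, (bget bA m = 0 ↔ bget bo m = 0) := by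
    intro m hmc
    by_cases hmcap : m ∈ (capFilter bo comps).flatten
    · have h1 : bget bA m = -t := by rw [J.bchar m hmc, if_pos hmcap]
      have h2 : bget bo m = t := (F1 m (capsub m hmcap)).2
      constructor
      · intro h; omega
      · intro h; omega
    · rw [F2 m hmc hmcap]
  have hans : ((bfsLoop bA t 25 [n] (bset V n 1) [n] false).2.2 = true) ↔
      libB bo (flood bo t 25 n []) = true := by
    rw [r6, libB_iff]
    constructor
    · rintro ⟨c, hc, m, hm, hbm⟩
      have hcc : c ∈ cells := (r3 c hc).1
      exact ⟨c, hKsub c hc, m, hm, (hzero m (nbrs_mem_cells c hcc m hm)).1 hbm⟩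
    · rintro ⟨c, hc, m, hm, hbm⟩
      have hcc : c ∈ cells := Kgood.2.1 c hc
      exact ⟨c, hKsup c hc, m, hm, (hzero m (nbrs_mem_cells c hcc m hm)).2 hbm⟩
  have hunfold : check_component bA V n evA =
      (if (bfsLoop bA t 25 [n] (bset V n 1) [n] false).2.2 = false then
        ((bfsLoop bA t 25 [n] (bset V n 1) [n] false).2.1.foldl
            (fun bb k => bset bb k (-t)) bA,
         (bfsLoop bA t 25 [n] (bset V n 1) [n] false).1,
         evA - ((bfsLoop bA t 25 [n] (bset V n 1) [n] false).2.1.length : Int) * 2 * t)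
       else (bA, (bfsLoop bA t 25 [n] (bset V n 1) [n] false).1, evA)) := by
    simp only [check_component]
    rw [F3]
  have hgood' : ∀ C ∈ comps ++ [flood bo t 25 n []], GoodComp bo t C := by
    intro C hC
    rcases List.mem_append.1 hC with h | h
    · exact J.good C h
    · rw [show C = flood bo t 25 n [] by simpa using h]
      exact Kgood
  have hflatiff : ∀ p, (p ∈ (comps ++ [flood bo t 25 n []]).flatten ↔
      p ∈ comps.flatten ∨ p ∈ flood bo t 25 n []) := by
    intro p
    rw [List.flatten_append]
    simp [List.mem_append]
  cases hLib : libB bo (flood bo t 25 n []) with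
  | true =>
    have hL : (bfsLoop bA t 25 [n] (bset V n 1) [n] false).2.2 = true := hans.2 hLib
    have hLne : ¬ ((bfsLoop bA t 25 [n] (bset V n 1) [n] false).2.2 = false) := by
      rw [hL]; simp
    rw [hunfold, if_neg hLne]
    have hcapF : capFilter bo (comps ++ [flood bo t 25 n []]) = capFilter bo comps := by
      simp [capFilter, List.filter_append, hLib]
    refine ⟨J.shapeA, r4, hgood', ?_, ?_, ?_⟩
    · intro p hp
      rw [r5 p hp]
      have hiff : (p ∈ comps.flatten ∨
          p ∈ (bfsLoop bA t 25 [n] (bset V n 1) [n] false).2.1) ↔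
          p ∈ (comps ++ [flood bo t 25 n []]).flatten := by
        rw [hflatiff p, hmemiff p]
      rw [if_congr hiff rfl rfl]
    · intro p hp
      rw [J.bchar p hp, hcapF]
    · rw [J.ev]
      have : capSum bo t (comps ++ [flood bo t 25 n []]) = capSum bo t comps := by
        simp [capSum, hcapF]
      rw [this]
  | false =>
    have hL : (bfsLoop bA t 25 [n] (bset V n 1) [n] false).2.2 = false := by
      cases hL2 : (bfsLoop bA t 25 [n] (bset V n 1) [n] false).2.2 with
      | false => rfl
      | true => rw [hans.1 hL2] at hLib; exact absurd hLib (by simp)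
    rw [hunfold, if_pos hL]
    have hcapF : capFilter bo (comps ++ [flood bo t 25 n []]) =
        capFilter bo comps ++ [flood bo t 25 n []] := by
      simp [capFilter, List.filter_append, hLib]
    obtain ⟨hshape', hbset'⟩ := bget_foldl_bset (-t)
      (bfsLoop bA t 25 [n] (bset V n 1) [n] false).2.1 bA J.shapeA
      (fun x hx => (r3 x hx).1)
    refine ⟨hshape', r4, hgood', ?_, ?_, ?_⟩
    · intro p hp
      rw [r5 p hp]
      have hiff : (p ∈ comps.flatten ∨
          p ∈ (bfsLoop bA t 25 [n] (bset V n 1) [n] false).2.1) ↔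
          p ∈ (comps ++ [flood bo t 25 n []]).flatten := by
        rw [hflatiff p, hmemiff p]
      rw [if_congr hiff rfl rfl]
    · intro p hp
      rw [hbset' p]
      have hcapiff : (p ∈ (capFilter bo (comps ++ [flood bo t 25 n []])).flatten ↔
          p ∈ (capFilter bo comps).flatten ∨ p ∈ flood bo t 25 n []) := by
        rw [hcapF, List.flatten_append]
        simp [List.mem_append]
      by_cases hpK : p ∈ (bfsLoop bA t 25 [n] (bset V n 1) [n] false).2.1
      · rw [if_pos hpK, if_pos (hcapiff.2 (Or.inr ((hmemiff p).1 hpK)))]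
      · rw [if_neg hpK, J.bchar p hp]
        have hpK' : ¬ p ∈ flood bo t 25 n [] := fun h => hpK ((hmemiff p).2 h)
        by_cases hpc : p ∈ (capFilter bo comps).flatten
        · rw [if_pos hpc, if_pos (hcapiff.2 (Or.inl hpc))]
        · rw [if_neg hpc, if_neg (by
            intro h
            rcases hcapiff.1 h with h' | h'
            · exact hpc h'
            · exact hpK' h')]
    · rw [J.ev, hlen]
      have : capSum bo t (comps ++ [flood bo t 25 n []]) =
          capSum bo t comps + ((flood bo t 25 n []).length : Int) * 2 * t := by
        simp [capSum, hcapF]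
      rw [this]
      ring

-- the shared outer loop, A's fold and B's phase-1 fold in lockstep
theorem outer_fold (bo : List (List Int)) (t : Int) (pp : Nat × Nat) (hpp : pp ∈ cells)
    (ht : t ≠ 0) (hpos : bget bo pp = -t) (ev0 : Int) :
    ∀ (ns : List (Nat × Nat)), (∀ n ∈ ns, n ∈ cells) →
    ∀ (comps : List (List (Nat × Nat))) (bA V : List (List Int)) (evA : Int),
      JInv bo t comps bA V evA ev0 →
      JInv bo t
        (ns.foldl (fun (comps : List (List (Nat × Nat))) n =>
          if bget bo n = t ∧ (∀ C ∈ comps, ¬ n ∈ C) then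
            comps ++ [flood bo t 25 n []]
          else comps) comps)
        ((ns.foldl (fun (st : List (List Int) × List (List Int) × Int) n =>
          if bget st.1 n = -(bget st.1 pp) ∧ bget st.2.1 n = 0 then
            check_component st.1 st.2.1 n st.2.2
          else st) (bA, V, evA)).1)
        ((ns.foldl (fun (st : List (List Int) × List (List Int) × Int) n =>
          if bget st.1 n = -(bget st.1 pp) ∧ bget st.2.1 n = 0 then
            check_component st.1 st.2.1 n st.2.2
          else st) (bA, V, evA)).2.1)
        ((ns.foldl (fun (st : List (List Int) × List (List Int) × Int) n =>
          if bget st.1 n = -(bget st.1 pp) ∧ bget st.2.1 n = 0 then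
            check_component st.1 st.2.1 n st.2.2
          else st) (bA, V, evA)).2.2)
        ev0 := by
  intro ns
  induction ns with
  | nil => intro _ comps bA V evA J; exact J
  | cons n ns ih =>
    intro hns comps bA V evA J
    have hnc : n ∈ cells := hns n (by simp)
    have hns' : ∀ k ∈ ns, k ∈ cells := fun k hk => hns k (by simp [hk])
    have hnegt : ¬ (-t = t) := by omega
    have capsub : ∀ p, p ∈ (capFilter bo comps).flatten → p ∈ comps.flatten := by
      intro p hp
      rw [List.mem_flatten] at hp ⊢
      obtain ⟨C, hC, hpC⟩ := hp
      exact ⟨C, (List.mem_filter.1 hC).1, hpC⟩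
    have F1 : ∀ x ∈ comps.flatten, x ∈ cells ∧ bget bo x = t := by
      intro x hx
      obtain ⟨C, hC, hxC⟩ := List.mem_flatten.1 hx
      exact ⟨(J.good C hC).2.1 x hxC, (J.good C hC).2.2.1 x hxC⟩
    have hppcap : ¬ pp ∈ (capFilter bo comps).flatten := by
      intro h
      have := (F1 pp (capsub pp h)).2
      rw [hpos] at this
      exact hnegt this
    have hbApp : bget bA pp = -t := by
      rw [J.bchar pp hpp, if_neg hppcap, hpos]
    have hVn : bget V n = 0 ↔ ¬ n ∈ comps.flatten := by
      rw [J.vchar n hnc]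
      by_cases h : n ∈ comps.flatten
      · rw [if_pos h]
        constructor
        · intro h'; exact absurd h'.symm (by norm_num)
        · intro h'; exact absurd h h'
      · rw [if_neg h]; exact ⟨fun _ => h, fun _ => rfl⟩
    have hguard : (bget bA n = -(bget bA pp) ∧ bget V n = 0) ↔
        (bget bo n = t ∧ ¬ n ∈ comps.flatten) := by
      rw [hbApp, neg_neg, hVn]
      constructor
      · rintro ⟨h1, h2⟩
        have hncap : ¬ n ∈ (capFilter bo comps).flatten := fun h => h2 (capsub n h)
        rw [J.bchar n hnc, if_neg hncap] at h1
        exact ⟨h1, h2⟩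
      · rintro ⟨h1, h2⟩
        have hncap : ¬ n ∈ (capFilter bo comps).flatten := fun h => h2 (capsub n h)
        rw [J.bchar n hnc, if_neg hncap]
        exact ⟨h1, h2⟩
    have hguardB : (bget bo n = t ∧ (∀ C ∈ comps, ¬ n ∈ C)) ↔
        (bget bo n = t ∧ ¬ n ∈ comps.flatten) := by
      constructor
      · rintro ⟨h1, h2⟩
        refine ⟨h1, fun h => ?_⟩
        obtain ⟨C, hC, hnC⟩ := List.mem_flatten.1 h
        exact h2 C hC hnC
      · rintro ⟨h1, h2⟩
        exact ⟨h1, fun C hC hnC => h2 (List.mem_flatten.2 ⟨C, hC, hnC⟩)⟩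
    simp only [List.foldl_cons]
    by_cases hg : bget bo n = t ∧ ¬ n ∈ comps.flatten
    · rw [if_pos (hguard.2 hg), if_pos (hguardB.2 hg)]
      have J' := seed_step bo t ht ev0 comps bA V evA J n hnc hg.1 hg.2
      have heta : check_component bA V n evA =
          ((check_component bA V n evA).1, (check_component bA V n evA).2.1,
           (check_component bA V n evA).2.2) := rfl
      rw [heta]
      exact ih hns' (comps ++ [flood bo t 25 n []]) _ _ _ J'
    · rw [if_neg (fun h => hg (hguard.1 h)), if_neg (fun h => hg (hguardB.1 h))]
      exact ih hns' comps bA V evA J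

-- B's phase 2 computes ev0 - capSum of all the components
theorem phase2 (bo : List (List Int)) (t : Int) (ht : t ≠ 0) (ev0 : Int) :
    ∀ (rest pre : List (List (Nat × Nat))) (bB : List (List Int)) (evB : Int),
      (∀ C ∈ pre ++ rest, GoodComp bo t C) → ShapeOK bB →
      (∀ p ∈ cells, bget bB p = if p ∈ (capFilter bo pre).flatten then -t else bget bo p) →
      evB = ev0 - capSum bo t pre →
      (rest.foldl (fun (st : List (List Int) × Int) comp =>
        if comp.any (fun q => (nbrs q).any (fun m => bget st.1 m == 0)) then st
        else (comp.foldl (fun bb qc => bset bb qc (-t)) st.1,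
              st.2 - (comp.length : Int) * 2 * t)) (bB, evB)).2
        = ev0 - capSum bo t (pre ++ rest) := by
  intro rest
  induction rest with
  | nil =>
    intro pre bB evB _ _ _ hev
    rw [List.foldl_nil, List.append_nil]
    exact hev
  | cons C rest ih =>
    intro pre bB evB hgood hsh hchar hev
    have hCg : GoodComp bo t C :=
      hgood C (List.mem_append.2 (Or.inr (by simp)))
    have capsub : ∀ p, p ∈ (capFilter bo pre).flatten → p ∈ pre.flatten := by
      intro p hp
      rw [List.mem_flatten] at hp ⊢
      obtain ⟨D, hD, hpD⟩ := hp
      exact ⟨D, (List.mem_filter.1 hD).1, hpD⟩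
    have hzero : ∀ m ∈ cells, (bget bB m = 0 ↔ bget bo m = 0) := by
      intro m hmc
      by_cases hmcap : m ∈ (capFilter bo pre).flatten
      · obtain ⟨D, hD, hmD⟩ := List.mem_flatten.1 (capsub m hmcap)
        have hDg : GoodComp bo t D :=
          hgood D (List.mem_append.2 (Or.inl hD))
        have h1 : bget bB m = -t := by rw [hchar m hmc, if_pos hmcap]
        have h2 : bget bo m = t := hDg.2.2.1 m hmD
        constructor
        · intro h; omega
        · intro h; omega
      · rw [hchar m hmc, if_neg hmcap]
    have hlibeq : (C.any (fun q => (nbrs q).any (fun m => bget bB m == 0))) = libB bo C := by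
      rw [Bool.eq_iff_iff]
      rw [libB_iff]
      rw [List.any_eq_true]
      constructor
      · rintro ⟨q, hq, hinner⟩
        obtain ⟨m, hm, hbm⟩ := List.any_eq_true.1 hinner
        have hmc : m ∈ cells := nbrs_mem_cells q (hCg.2.1 q hq) m hm
        exact ⟨q, hq, m, hm, (hzero m hmc).1 (by simpa using hbm)⟩
      · rintro ⟨q, hq, m, hm, hbm⟩
        have hmc : m ∈ cells := nbrs_mem_cells q (hCg.2.1 q hq) m hm
        exact ⟨q, hq, List.any_eq_true.2 ⟨m, hm, by simp [(hzero m hmc).2 hbm]⟩⟩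
    have hgood' : ∀ D ∈ (pre ++ [C]) ++ rest, GoodComp bo t D := by
      intro D hD
      apply hgood
      rw [List.append_assoc] at hD
      simpa using hD
    have happ : (pre ++ [C]) ++ rest = pre ++ (C :: rest) := by simp
    simp only [List.foldl_cons]
    cases hLib : libB bo C with
    | true =>
      rw [if_pos (by rw [hlibeq, hLib])]
      have hcapF : capFilter bo (pre ++ [C]) = capFilter bo pre := by
        simp [capFilter, List.filter_append, hLib]
      have hres := ih (pre ++ [C]) bB evB hgood' hsh
        (by intro p hp; rw [hchar p hp, hcapF]) (by rw [hev]; simp [capSum, hcapF])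
      rw [happ] at hres
      exact hres
    | false =>
      rw [if_neg (by rw [hlibeq, hLib]; simp)]
      have hcapF : capFilter bo (pre ++ [C]) = capFilter bo pre ++ [C] := by
        simp [capFilter, List.filter_append, hLib]
      obtain ⟨hsh', hbs⟩ := bget_foldl_bset (-t) C bB hsh hCg.2.1
      have hchar' : ∀ p ∈ cells, bget (C.foldl (fun bb qc => bset bb qc (-t)) bB) p =
          if p ∈ (capFilter bo (pre ++ [C])).flatten then -t else bget bo p := by
        intro p hp
        rw [hbs p]
        have hcapiff : (p ∈ (capFilter bo (pre ++ [C])).flatten ↔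
            p ∈ (capFilter bo pre).flatten ∨ p ∈ C) := by
          rw [hcapF, List.flatten_append]
          simp [List.mem_append]
        by_cases hpC : p ∈ C
        · rw [if_pos hpC, if_pos (hcapiff.2 (Or.inr hpC))]
        · rw [if_neg hpC, hchar p hp]
          by_cases hpc : p ∈ (capFilter bo pre).flatten
          · rw [if_pos hpc, if_pos (hcapiff.2 (Or.inl hpc))]
          · rw [if_neg hpc, if_neg (by
              intro h
              rcases hcapiff.1 h with h' | h'
              · exact hpc h'
              · exact hpC h')]
      have hev' : evB - (C.length : Int) * 2 * t = ev0 - capSum bo t (pre ++ [C]) := by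
        rw [hev]
        have : capSum bo t (pre ++ [C]) = capSum bo t pre + (C.length : Int) * 2 * t := by
          simp [capSum, hcapF]
        rw [this]
        ring
      have hres := ih (pre ++ [C]) (C.foldl (fun bb qc => bset bb qc (-t)) bB)
        (evB - (C.length : Int) * 2 * t) hgood' hsh' hchar' hev'
      rw [happ] at hres
      exact hres

-- ---------- the degenerate value-0 case (A's eval never changes) ----------
theorem bfs_vals (b : List (List Int)) (v : Int) :
    ∀ (fuel : Nat) (queue comp : List (Nat × Nat)) (V : List (List Int)) (ans : Bool),
      (∀ x ∈ comp, bget b x = v ∧ x ∈ cells) → (∀ x ∈ queue, x ∈ comp) →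
      ∀ x ∈ (bfsLoop b v fuel queue V comp ans).2.1, bget b x = v ∧ x ∈ cells := by
  intro fuel
  induction fuel with
  | zero => intro queue comp V ans h1 _ x hx; exact h1 x hx
  | succ fuel ih =>
    intro queue comp V ans h1 hq
    match queue with
    | [] => exact fun x hx => h1 x hx
    | c :: rest =>
      have hc : c ∈ comp := hq c (by simp)
      have hccell : c ∈ cells := (h1 c hc).2
      have step : ∀ (st : List (Nat × Nat) × List (List Int) × List (Nat × Nat) × Bool)
          (m : Nat × Nat), m ∈ adjAt c →
          ((∀ x ∈ st.2.2.1, bget b x = v ∧ x ∈ cells) ∧ (∀ x ∈ st.1, x ∈ st.2.2.1)) →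
          ((∀ x ∈ (bfsStep b v st m).2.2.1, bget b x = v ∧ x ∈ cells) ∧
           (∀ x ∈ (bfsStep b v st m).1, x ∈ (bfsStep b v st m).2.2.1)) := by
        intro st m hm hQ
        have hmc : m ∈ cells := by
          rw [adj_eq_nbrs c hccell] at hm
          exact nbrs_mem_cells c hccell m hm
        unfold bfsStep
        split_ifs with hv hb0 hbv
        · exact hQ
        · exact hQ
        · constructor
          · intro x hx
            rcases List.mem_append.1 hx with h | h
            · exact hQ.1 x h
            · have hxm : x = m := by simpa using h
              rw [hxm]; exact ⟨hbv, hmc⟩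
          · intro x hx
            rcases List.mem_append.1 hx with h | h
            · exact List.mem_append.2 (Or.inl (hQ.2 x h))
            · exact List.mem_append.2 (Or.inr h)
        · exact hQ
      have hfold := foldl_pres
        (fun (st : List (Nat × Nat) × List (List Int) × List (Nat × Nat) × Bool) =>
          (∀ x ∈ st.2.2.1, bget b x = v ∧ x ∈ cells) ∧ (∀ x ∈ st.1, x ∈ st.2.2.1))
        (bfsStep b v) (adjAt c) step (rest, V, comp, ans)
        ⟨h1, fun x hx => hq x (by simp [hx])⟩
      rw [show bfsLoop b v (fuel + 1) (c :: rest) V comp ans =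
            bfsLoop b v fuel ((adjAt c).foldl (bfsStep b v) (rest, V, comp, ans)).1
              ((adjAt c).foldl (bfsStep b v) (rest, V, comp, ans)).2.1
              ((adjAt c).foldl (bfsStep b v) (rest, V, comp, ans)).2.2.1
              ((adjAt c).foldl (bfsStep b v) (rest, V, comp, ans)).2.2.2 from rfl]
      exact ih _ _ _ _ hfold.1 hfold.2

theorem zero_fold (bo : List (List Int)) (pp : Nat × Nat) (hpp : pp ∈ cells)
    (h0 : bget bo pp = 0) :
    ∀ (ns : List (Nat × Nat)), (∀ n ∈ ns, n ∈ cells) →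
    ∀ (bA V : List (List Int)) (evA : Int), ShapeOK bA →
      (∀ p ∈ cells, bget bA p = bget bo p) →
      ShapeOK ((ns.foldl (fun (st : List (List Int) × List (List Int) × Int) n =>
          if bget st.1 n = -(bget st.1 pp) ∧ bget st.2.1 n = 0 then
            check_component st.1 st.2.1 n st.2.2
          else st) (bA, V, evA)).1) ∧
      (∀ p ∈ cells, bget ((ns.foldl (fun (st : List (List Int) × List (List Int) × Int) n =>
          if bget st.1 n = -(bget st.1 pp) ∧ bget st.2.1 n = 0 then
            check_component st.1 st.2.1 n st.2.2
          else st) (bA, V, evA)).1) p = bget bo p) ∧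
      ((ns.foldl (fun (st : List (List Int) × List (List Int) × Int) n =>
          if bget st.1 n = -(bget st.1 pp) ∧ bget st.2.1 n = 0 then
            check_component st.1 st.2.1 n st.2.2
          else st) (bA, V, evA)).2.2) = evA := by
  intro ns
  induction ns with
  | nil => intro _ bA V evA hsh hch; exact ⟨hsh, hch, rfl⟩
  | cons n ns ih =>
    intro hns bA V evA hsh hch
    have hnc : n ∈ cells := hns n (by simp)
    have hns' : ∀ k ∈ ns, k ∈ cells := fun k hk => hns k (by simp [hk])
    simp only [List.foldl_cons]
    by_cases hg : bget bA n = -(bget bA pp) ∧ bget V n = 0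
    · rw [if_pos hg]
      have hval : bget bA n = 0 := by
        rw [hg.1, hch pp hpp, h0]; norm_num
      have hvals := bfs_vals bA (bget bA n) 25 [n] [n] (bset V n 1) false
        (by intro x hx
            have hxn : x = n := by simpa using hx
            rw [hxn]; exact ⟨rfl, hnc⟩)
        (by simp)
      have hev : (check_component bA V n evA).2.2 = evA := by
        simp only [check_component]
        split_ifs with h
        · rw [hval]; ring
        · rfl
      have hres : ShapeOK (check_component bA V n evA).1 ∧
          (∀ p ∈ cells, bget (check_component bA V n evA).1 p = bget bo p) := by
        simp only [check_component]
        split_ifs with h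
        · obtain ⟨hsh', hbs⟩ := bget_foldl_bset (-(bget bA n))
            (bfsLoop bA (bget bA n) 25 [n] (bset V n 1) [n] false).2.1 bA hsh
            (fun x hx => (hvals x hx).2)
          refine ⟨hsh', ?_⟩
          intro p hp
          rw [hbs p]
          by_cases hpc : p ∈ (bfsLoop bA (bget bA n) 25 [n] (bset V n 1) [n] false).2.1
          · rw [if_pos hpc, hval, ← hch p hp, (hvals p hpc).1, hval]
            norm_num
          · rw [if_neg hpc]; exact hch p hp
        · exact ⟨hsh, hch⟩
      have heta : check_component bA V n evA =
          ((check_component bA V n evA).1, (check_component bA V n evA).2.1,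
           (check_component bA V n evA).2.2) := rfl
      rw [heta]
      obtain ⟨q1, q2, q3⟩ := ih hns' (check_component bA V n evA).1
        (check_component bA V n evA).2.1 (check_component bA V n evA).2.2 hres.1 hres.2
      exact ⟨q1, q2, by rw [q3, hev]⟩
    · rw [if_neg hg]
      exact ih hns' bA V evA hsh hch

-- ===== VERDICT (by name: the statement is the Claim_ definition above) =====
theorem vay_spec : Claim_equal_vay := by
  unfold Claim_equal_vay
  intro board pos eval _ hpre
  show vay board pos eval = vay_alt board pos eval
  rcases hpre with hfull | htriv
  · -- the natural 5x5 domain: the full capture logic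
    obtain ⟨hb1, hb2, hp1, hp2, hp3, hp4⟩ := hfull
    have hbg : ∀ g, bgetI g (pos.1, pos.2) = bget g (pos.1.toNat, pos.2.toNat) :=
      fun g => bgetI_nonneg g (pos.1, pos.2) hp1 hp3
    have hshape : ShapeOK board := ⟨hb1, hb2⟩
    have hppc : (pos.1.toNat, pos.2.toNat) ∈ cells := by
      apply mem_cells_of_lt
      · show pos.1.toNat < 5; omega
      · show pos.2.toNat < 5; omega
    have hadjc : ∀ n ∈ adjAt (pos.1.toNat, pos.2.toNat), n ∈ cells := by
      rw [adj_eq_nbrs _ hppc]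
      exact nbrs_mem_cells _ hppc
    have hAeq : vay board pos eval =
        ((adjAt (pos.1.toNat, pos.2.toNat)).foldl
          (fun (st : List (List Int) × List (List Int) × Int) n =>
            if bget st.1 n = -(bget st.1 (pos.1.toNat, pos.2.toNat)) ∧ bget st.2.1 n = 0 then
              check_component st.1 st.2.1 n st.2.2
            else st)
          (board, [[0,0,0,0,0],[0,0,0,0,0],[0,0,0,0,0],[0,0,0,0,0],[0,0,0,0,0]],
           eval)).2.2 := by
      simp only [vay]
      rw [adjAtI_nonneg (pos.1, pos.2) hp1 hp3]
      have hfun : (fun (st : List (List Int) × List (List Int) × Int) n =>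
          if bget st.1 n = -(bgetI st.1 (pos.1, pos.2)) ∧ bget st.2.1 n = 0 then
            check_component st.1 st.2.1 n st.2.2
          else st) =
          (fun (st : List (List Int) × List (List Int) × Int) n =>
          if bget st.1 n = -(bget st.1 (pos.1.toNat, pos.2.toNat)) ∧ bget st.2.1 n = 0 then
            check_component st.1 st.2.1 n st.2.2
          else st) := by
        funext st n
        rw [hbg st.1]
      rw [hfun]
    by_cases ht : bget board (pos.1.toNat, pos.2.toNat) = 0
    · have hz := zero_fold board (pos.1.toNat, pos.2.toNat) hppc ht
        (adjAt (pos.1.toNat, pos.2.toNat)) hadjc board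
        [[0,0,0,0,0],[0,0,0,0,0],[0,0,0,0,0],[0,0,0,0,0],[0,0,0,0,0]] eval hshape
        (fun p _ => rfl)
      have hBeq : vay_alt board pos eval = eval := by
        simp only [vay_alt]
        rw [hbg board, ht]
        norm_num
      rw [hAeq, hz.2.2, hBeq]
    · have ht' : -(bget board (pos.1.toNat, pos.2.toNat)) ≠ 0 := by omega
      have hz0 : ∀ p ∈ cells,
          bget [[0,0,0,0,0],[0,0,0,0,0],[0,0,0,0,0],[0,0,0,0,0],[0,0,0,0,0]] p = 0 := by
        decide
      have J0 : JInv board (-(bget board (pos.1.toNat, pos.2.toNat))) [] board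
          [[0,0,0,0,0],[0,0,0,0,0],[0,0,0,0,0],[0,0,0,0,0],[0,0,0,0,0]] eval eval := by
        have hZshape : ShapeOK
            [[0,0,0,0,0],[0,0,0,0,0],[0,0,0,0,0],[0,0,0,0,0],[0,0,0,0,0]] := by
          refine ⟨by norm_num, ?_⟩
          intro i hi
          interval_cases i <;> simp
        refine ⟨hshape, hZshape, ?_, ?_, ?_, ?_⟩
        · intro C hC; simp at hC
        · intro p hp
          rw [hz0 p hp]
          simp
        · intro p hp
          simp [capFilter]
        · simp [capSum, capFilter]
      have hJ := outer_fold board (-(bget board (pos.1.toNat, pos.2.toNat)))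
        (pos.1.toNat, pos.2.toNat) hppc ht' (neg_neg _).symm eval
        (adjAt (pos.1.toNat, pos.2.toNat)) hadjc [] board
        [[0,0,0,0,0],[0,0,0,0,0],[0,0,0,0,0],[0,0,0,0,0],[0,0,0,0,0]] eval J0
      have hBeq : vay_alt board pos eval =
          (((adjAt (pos.1.toNat, pos.2.toNat)).foldl
              (fun (comps : List (List (Nat × Nat))) n =>
                if bget board n = -(bget board (pos.1.toNat, pos.2.toNat)) ∧
                    (∀ C ∈ comps, ¬ n ∈ C) then
                  comps ++ [flood board (-(bget board (pos.1.toNat, pos.2.toNat))) 25 n []]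
                else comps) []).foldl
            (fun (st : List (List Int) × Int) comp =>
              if comp.any (fun q => (nbrs q).any (fun m => bget st.1 m == 0)) then st
              else (comp.foldl
                  (fun bb qc => bset bb qc (-(-(bget board (pos.1.toNat, pos.2.toNat))))) st.1,
                st.2 - (comp.length : Int) * 2 *
                  (-(bget board (pos.1.toNat, pos.2.toNat))))) (board, eval)).2 := by
        simp only [vay_alt]
        rw [hbg board, if_neg ht', nbrsI_nonneg (pos.1, pos.2) hp1 hp3,
          ← adj_eq_nbrs _ hppc]
      have hph := phase2 board (-(bget board (pos.1.toNat, pos.2.toNat))) ht' eval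
        ((adjAt (pos.1.toNat, pos.2.toNat)).foldl
          (fun (comps : List (List (Nat × Nat))) n =>
            if bget board n = -(bget board (pos.1.toNat, pos.2.toNat)) ∧
                (∀ C ∈ comps, ¬ n ∈ C) then
              comps ++ [flood board (-(bget board (pos.1.toNat, pos.2.toNat))) 25 n []]
            else comps) []) [] board eval
        (by simpa using hJ.good) hshape
        (by intro p hp; simp [capFilter]) (by simp [capSum, capFilter])
      rw [List.nil_append] at hph
      rw [hAeq, hBeq, hph]
      exact hJ.ev
  · -- the no-capture class: both programs return eval unchanged
    obtain ⟨_, _, _, _, _, hadj, hnbr⟩ := htriv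
    have hAeq : vay board pos eval = eval := by
      simp only [vay]
      rw [foldl_fixed _ _ (adjAtI (pos.1, pos.2)) ?_]
      intro n hn
      rw [if_neg]
      rintro ⟨h1, _⟩
      exact (hadj n hn).2 h1
    have hBeq : vay_alt board pos eval = eval := by
      simp only [vay_alt]
      by_cases h0 : -(bgetI board (pos.1, pos.2)) = 0
      · rw [if_pos h0]
      · rw [if_neg h0]
        have hcomps : (nbrsI (pos.1, pos.2)).foldl
            (fun (comps : List (List (Nat × Nat))) n =>
              if bget board n = -(bgetI board (pos.1, pos.2)) ∧ (∀ C ∈ comps, ¬ n ∈ C) then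
                comps ++ [flood board (-(bgetI board (pos.1, pos.2))) 25 n []]
              else comps) [] = [] := by
          apply foldl_fixed
          intro n hn
          rw [if_neg]
          rintro ⟨h1, _⟩
          exact (hnbr n hn).2 h1
        rw [hcomps]
        rfl
    rw [hAeq, hBeq]
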